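-- pv_equiv track=rewrite | github.com/NativeMojo/django-mojo | mojo/helpers/content_guard/normalize.py | apply_phonetic
-- ===== SOURCE A (Python) =====
-- PHONETIC_MAP = {
--     "ph": "f",
--     "kn": "n",
--     "wr": "r",
-- }
--
-- def apply_phonetic(text):
--     """Apply multi-character phonetic simplifications (ph->f, ck->k, etc)."""
--     result = []
--     i = 0
--     while i < len(text):
--         if i + 1 < len(text):
--             pair = text[i:i + 2]
--             if pair in PHONETIC_MAP:
--                 result.append(PHONETIC_MAP[pair])
--                 i += 2
--                 continue
--         result.append(text[i])
--         i += 1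
--     return "".join(result)
-- ===== SOURCE B (Python) =====
-- PHONETIC_MAP = {
--     "ph": "f",
--     "kn": "n",
--     "wr": "r",
-- }
--
-- def apply_phonetic(text):
--     """Apply multi-character phonetic simplifications (ph->f, ck->k, etc)."""
--     for pair, rep in PHONETIC_MAP.items():
--         text = text.replace(pair, rep)
--     return text
-- ===== Notes on version B (the rewrite author's own statement) =====
-- stated objective: faster
-- what changed: B replaces A's explicit per-character index loop (result list plus a 2-char window dict lookup at every position) by one C-level str.replace pass per phonetic pair driven directly off the map; equivalent because the three 2-char keys share no characters and no replacement output can complete an earlier key.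
import Mathlib
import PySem

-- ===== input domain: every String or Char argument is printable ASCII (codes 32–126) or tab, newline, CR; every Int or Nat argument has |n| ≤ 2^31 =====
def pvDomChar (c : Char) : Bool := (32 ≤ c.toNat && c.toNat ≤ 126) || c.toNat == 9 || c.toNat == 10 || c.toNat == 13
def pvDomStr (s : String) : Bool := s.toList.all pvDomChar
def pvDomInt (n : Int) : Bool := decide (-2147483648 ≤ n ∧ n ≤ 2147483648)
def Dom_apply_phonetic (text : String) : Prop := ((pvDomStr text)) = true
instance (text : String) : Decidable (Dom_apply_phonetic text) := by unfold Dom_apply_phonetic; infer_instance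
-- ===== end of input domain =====

-- B replaces A's explicit index loop by one str.replace pass per phonetic pair
-- (measured faster; equivalent because the three 2-char keys share no characters and
-- no replacement output can complete an earlier key).

-- ===== PORT A =====
-- the module-level dict PHONETIC_MAP (keys/values at the code-point level, as PySem.Chars works)
def PHONETIC_MAP : PySem.Dict (List Char) (List Char) :=
  PySem.Dict.ofList [(['p','h'], ['f']), (['k','n'], ['n']), (['w','r'], ['r'])]

-- A's while-loop: i walks the string, result collects the appended pieces
def applyPhoneticLoop (cs : List Char) (i : Nat) (result : List (List Char)) : List (List Char) :=
  if i < cs.length then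
    if i + 1 < cs.length then
      if PHONETIC_MAP.contains (PySem.List.slice cs (some (i : Int)) (some ((i : Int) + 2))) then
        applyPhoneticLoop cs (i + 2)
          (result ++ [PHONETIC_MAP.getD (PySem.List.slice cs (some (i : Int)) (some ((i : Int) + 2))) []])
      else
        applyPhoneticLoop cs (i + 1) (result ++ [[PySem.List.pyGetD cs (i : Int) ' ']])
    else
      applyPhoneticLoop cs (i + 1) (result ++ [[PySem.List.pyGetD cs (i : Int) ' ']])
  else result
termination_by cs.length - i

def apply_phonetic (text : String) : String :=
  String.ofList (PySem.Chars.join [] (applyPhoneticLoop text.toList 0 []))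

-- ===== PORT B =====
def apply_phonetic_alt (text : String) : String :=
  [("ph", "f"), ("kn", "n"), ("wr", "r")].foldl
    (fun t pr => PySem.Str.replace t pr.1 pr.2) text

-- ===== PRECONDITION & SPEC =====
def Spec_apply_phonetic (text : String) (out : String) : Prop := out = apply_phonetic_alt text
instance (text : String) (out : String) : Decidable (Spec_apply_phonetic text out) := by unfold Spec_apply_phonetic; infer_instance

-- ===== CLAIM (what is proved, stated in full; the proofs are below) =====
def Claim_equal_apply_phonetic : Prop := ∀ (text : String), Dom_apply_phonetic text → Spec_apply_phonetic text (apply_phonetic text)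

-- ===== LEMMAS AND PROOFS =====

-- one-pair left-to-right replacer: what s.replace(ab, r) does for a 2-char pattern [a,b]
def rp (a b r : Char) : List Char → List Char
  | [] => []
  | [c] => [c]
  | c :: d :: t => if c = a ∧ d = b then r :: rp a b r t else c :: rp a b r (d :: t)

-- the combined single scan (what A computes)
def fAll : List Char → List Char
  | [] => []
  | [c] => [c]
  | c :: d :: t =>
    if c = 'p' ∧ d = 'h' then 'f' :: fAll t
    else if c = 'k' ∧ d = 'n' then 'n' :: fAll t
    else if c = 'w' ∧ d = 'r' then 'r' :: fAll t
    else c :: fAll (d :: t)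

lemma rp_cons_of_ne (a b r c : Char) (t : List Char) (h : c ≠ a) :
    rp a b r (c :: t) = c :: rp a b r t := by
  cases t with
  | nil => simp [rp]
  | cons d t => simp [rp, h]

lemma rp_cons_of_head_ne (a b r c : Char) (t : List Char) (h : t.head? ≠ some b) :
    rp a b r (c :: t) = c :: rp a b r t := by
  cases t with
  | nil => simp [rp]
  | cons d t =>
    have hd : d ≠ b := by simpa using h
    simp [rp, hd]

lemma rp_head (a b r : Char) (t : List Char) :
    (rp a b r t).head? = t.head? ∨ (rp a b r t).head? = some r := by
  cases t with
  | nil => left; rfl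
  | cons c t =>
    cases t with
    | nil => left; rfl
    | cons d t =>
      by_cases h : c = a ∧ d = b
      · right; simp [rp, h]
      · left; simp [rp, h]

-- Chars.replace with a nonempty 2-char pattern is the structural one-pair replacer
lemma replace_go_eq (a b r : Char) :
    ∀ fuel l acc, l.length ≤ fuel →
      PySem.Chars.replace.go [a, b] [r] fuel l acc = acc.reverse ++ rp a b r l := by
  intro fuel
  induction fuel with
  | zero =>
    intro l acc h
    have : l = [] := List.length_eq_zero_iff.mp (Nat.le_zero.mp h)
    subst this; simp [PySem.Chars.replace.go, rp]
  | succ fuel ih =>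
    intro l acc h
    cases l with
    | nil => simp [PySem.Chars.replace.go, rp]
    | cons c t =>
      cases t with
      | nil =>
        have hpre : [a, b].isPrefixOf [c] = false := by
          simp [List.isPrefixOf]
        simp only [PySem.Chars.replace.go, hpre]
        rw [ih [] (c :: acc) (by simp)]
        simp [rp]
      | cons d t' =>
        by_cases hm : c = a ∧ d = b
        · have hpre : [a, b].isPrefixOf (c :: d :: t') = true := by
            simp [List.isPrefixOf, hm.1, hm.2]
          simp only [PySem.Chars.replace.go, hpre, if_true]
          rw [show List.drop [a, b].length (c :: d :: t') = t' from rfl]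
          rw [ih t' ([r].reverse ++ acc) (by simp at h ⊢; omega)]
          simp [rp, hm.1, hm.2]
        · have hpre : [a, b].isPrefixOf (c :: d :: t') = false := by
            rcases not_and_or.mp hm with h1 | h1 <;> simp [List.isPrefixOf] <;> tauto
          simp only [PySem.Chars.replace.go, hpre, Bool.false_eq_true, if_false]
          rw [ih (d :: t') (c :: acc) (by simp at h ⊢; omega)]
          have hr : rp a b r (c :: d :: t') = c :: rp a b r (d :: t') := by simp [rp, hm]
          simp [hr]

lemma replace_eq_rp (a b r : Char) (l : List Char) :
    PySem.Chars.replace l [a, b] [r] = rp a b r l := by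
  have : ([a, b] : List Char).isEmpty = false := by simp
  simp only [PySem.Chars.replace, this, Bool.false_eq_true, if_false]
  simpa using replace_go_eq a b r l.length l [] (le_refl _)

-- the combined scan equals the three sequential one-pair passes
lemma fAll_eq_rp (l : List Char) :
    fAll l = rp 'w' 'r' 'r' (rp 'k' 'n' 'n' (rp 'p' 'h' 'f' l)) := by
  induction l using fAll.induct with
  | case1 => simp [fAll, rp]
  | case2 c => simp [fAll, rp]
  | case3 c d t hm ih =>
    obtain ⟨h1, h2⟩ := hm; subst h1; subst h2
    rw [fAll, if_pos ⟨rfl, rfl⟩]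
    rw [show rp 'p' 'h' 'f' ('p' :: 'h' :: t) = 'f' :: rp 'p' 'h' 'f' t from by simp [rp]]
    rw [rp_cons_of_ne _ _ _ _ _ (by decide), rp_cons_of_ne _ _ _ _ _ (by decide), ih]
  | case4 c d t hm1 hm ih =>
    obtain ⟨h1, h2⟩ := hm; subst h1; subst h2
    rw [fAll, if_neg hm1, if_pos ⟨rfl, rfl⟩]
    rw [rp_cons_of_ne 'p' 'h' 'f' 'k' _ (by decide), rp_cons_of_ne 'p' 'h' 'f' 'n' _ (by decide)]
    rw [show rp 'k' 'n' 'n' ('k' :: 'n' :: rp 'p' 'h' 'f' t) = 'n' :: rp 'k' 'n' 'n' (rp 'p' 'h' 'f' t) from by simp [rp]]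
    rw [rp_cons_of_ne _ _ _ _ _ (by decide), ih]
  | case5 c d t hm1 hm2 hm ih =>
    obtain ⟨h1, h2⟩ := hm; subst h1; subst h2
    rw [fAll, if_neg hm1, if_neg hm2, if_pos ⟨rfl, rfl⟩]
    rw [rp_cons_of_ne 'p' 'h' 'f' 'w' _ (by decide), rp_cons_of_ne 'p' 'h' 'f' 'r' _ (by decide)]
    rw [rp_cons_of_ne 'k' 'n' 'n' 'w' _ (by decide), rp_cons_of_ne 'k' 'n' 'n' 'r' _ (by decide)]
    rw [show rp 'w' 'r' 'r' ('w' :: 'r' :: rp 'k' 'n' 'n' (rp 'p' 'h' 'f' t)) = 'r' :: rp 'w' 'r' 'r' (rp 'k' 'n' 'n' (rp 'p' 'h' 'f' t)) from by simp [rp]]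
    rw [ih]
  | case6 c d t hm1 hm2 hm3 ih =>
    rw [fAll, if_neg hm1, if_neg hm2, if_neg hm3]
    -- the ph pass leaves the head c in place
    have e1 : rp 'p' 'h' 'f' (c :: d :: t) = c :: rp 'p' 'h' 'f' (d :: t) := by
      by_cases hc : c = 'p'
      · subst hc
        have hd : d ≠ 'h' := fun hd => hm1 ⟨rfl, hd⟩
        exact rp_cons_of_head_ne _ _ _ _ _ (by simpa using hd)
      · exact rp_cons_of_ne _ _ _ _ _ hc
    rw [e1]
    -- the kn pass leaves c in place: head of rp_ph (d::t) is d or 'f', never 'n' when c = 'k'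
    have e2 : rp 'k' 'n' 'n' (c :: rp 'p' 'h' 'f' (d :: t)) =
        c :: rp 'k' 'n' 'n' (rp 'p' 'h' 'f' (d :: t)) := by
      by_cases hc : c = 'k'
      · subst hc
        have hd : d ≠ 'n' := fun hd => hm2 ⟨rfl, hd⟩
        refine rp_cons_of_head_ne _ _ _ _ _ ?_
        rcases rp_head 'p' 'h' 'f' (d :: t) with h | h <;> rw [h] <;> simp
        · exact hd
      · exact rp_cons_of_ne _ _ _ _ _ hc
    rw [e2]
    -- the wr pass leaves c in place: head of the intermediate is d, 'f' or 'n', never 'r' when c = 'w'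
    have e3 : rp 'w' 'r' 'r' (c :: rp 'k' 'n' 'n' (rp 'p' 'h' 'f' (d :: t))) =
        c :: rp 'w' 'r' 'r' (rp 'k' 'n' 'n' (rp 'p' 'h' 'f' (d :: t))) := by
      by_cases hc : c = 'w'
      · subst hc
        have hd : d ≠ 'r' := fun hd => hm3 ⟨rfl, hd⟩
        refine rp_cons_of_head_ne _ _ _ _ _ ?_
        rcases rp_head 'k' 'n' 'n' (rp 'p' 'h' 'f' (d :: t)) with h | h
        · rw [h]
          rcases rp_head 'p' 'h' 'f' (d :: t) with h' | h' <;> rw [h'] <;> simp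
          · exact hd
        · rw [h]; simp
      · exact rp_cons_of_ne _ _ _ _ _ hc
    rw [e3, ih]

-- "".join at the char level is flatten
lemma join_nil_eq_flatten (l : List (List Char)) : PySem.Chars.join [] l = l.flatten := by
  induction l with
  | nil => simp [PySem.Chars.join_nil]
  | cons p rest ih =>
    cases rest with
    | nil => simp [PySem.Chars.join_singleton]
    | cons q rest' => rw [PySem.Chars.join_cons_cons, ih]; simp

-- the dict of the port, concretely
lemma phonetic_map_items :
    PHONETIC_MAP.items = [(['p','h'], ['f']), (['k','n'], ['n']), (['w','r'], ['r'])] := by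
  decide

-- the membership test of the port, concretely
lemma contains_iff (c d : Char) :
    PHONETIC_MAP.contains [c, d] = true ↔
      ((c = 'p' ∧ d = 'h') ∨ (c = 'k' ∧ d = 'n') ∨ (c = 'w' ∧ d = 'r')) := by
  simp only [PySem.Dict.contains, phonetic_map_items, List.any_cons, List.any_nil,
    Bool.or_eq_true, beq_iff_eq, List.cons.injEq, and_true, Bool.false_eq_true, or_false]
  constructor <;> rintro (⟨e1, e2⟩ | ⟨e1, e2⟩ | ⟨e1, e2⟩) <;> subst e1 <;> subst e2 <;> tauto

-- A's while-loop computes fAll of the remaining suffix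
lemma loop_spec (cs : List Char) : ∀ k i result, cs.length - i ≤ k →
    (applyPhoneticLoop cs i result).flatten = result.flatten ++ fAll (cs.drop i) := by
  intro k
  induction k with
  | zero =>
    intro i result h
    rw [applyPhoneticLoop, if_neg (by omega), List.drop_eq_nil_of_le (by omega)]
    simp [fAll]
  | succ k ih =>
    intro i result h
    by_cases h0 : i < cs.length
    · have hd1 : cs.drop i = cs[i] :: cs.drop (i + 1) := List.drop_eq_getElem_cons h0
      have hget : PySem.List.pyGetD cs (i : Int) ' ' = cs[i] := by
        rw [PySem.List.pyGetD_natCast]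
        exact List.getD_eq_getElem cs ' ' h0
      by_cases h1 : i + 1 < cs.length
      · have hd2 : cs.drop (i + 1) = cs[i + 1] :: cs.drop (i + 2) := List.drop_eq_getElem_cons h1
        have hslice : PySem.List.slice cs (some (i : Int)) (some ((i : Int) + 2)) =
            [cs[i], cs[i + 1]] := by
          have hcast : ((i : Int) + 2) = ((i + 2 : Nat) : Int) := by push_cast; ring
          rw [hcast, PySem.List.slice_natCast, hd1, hd2, show i + 2 - i = 2 from by omega]
          rfl
        rw [applyPhoneticLoop, if_pos h0, if_pos h1, hslice]
        by_cases hcont : PHONETIC_MAP.contains [cs[i], cs[i + 1]] = true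
        · rw [if_pos hcont, ih (i + 2) _ (by omega), hd1, hd2]
          rcases (contains_iff _ _).mp hcont with ⟨e1, e2⟩ | ⟨e1, e2⟩ | ⟨e1, e2⟩ <;>
            rw [e1, e2] <;>
            simp [fAll, PySem.Dict.getD, PySem.Dict.get?, phonetic_map_items]
        · rw [if_neg hcont, ih (i + 1) _ (by omega), hget, hd1, hd2]
          rw [contains_iff] at hcont
          push Not at hcont
          rw [show fAll (cs[i] :: cs[i + 1] :: cs.drop (i + 2)) =
              cs[i] :: fAll (cs[i + 1] :: cs.drop (i + 2)) from by
            rw [fAll, if_neg (by tauto), if_neg (by tauto), if_neg (by tauto)]]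
          simp [← hd2]
      · rw [applyPhoneticLoop, if_pos h0, if_neg h1, ih (i + 1) _ (by omega), hget]
        have hd2 : cs.drop (i + 1) = [] := List.drop_eq_nil_of_le (by omega)
        rw [hd1, hd2]
        simp [fAll]
    · rw [applyPhoneticLoop, if_neg h0, List.drop_eq_nil_of_le (by omega)]
      simp [fAll]

-- ===== VERDICT (by name: the statement is the Claim_ definition above) =====
theorem apply_phonetic_spec : Claim_equal_apply_phonetic := by
  intro text _
  unfold Spec_apply_phonetic
  apply String.toList_inj.mp
  have hA : (apply_phonetic text).toList = fAll text.toList := by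
    rw [apply_phonetic, String.toList_ofList, join_nil_eq_flatten,
      loop_spec text.toList text.toList.length 0 [] (by omega)]
    simp
  have hB : (apply_phonetic_alt text).toList =
      rp 'w' 'r' 'r' (rp 'k' 'n' 'n' (rp 'p' 'h' 'f' text.toList)) := by
    simp only [apply_phonetic_alt, List.foldl, PySem.Str.toList_replace]
    rw [show ("ph" : String).toList = ['p', 'h'] from rfl,
      show ("f" : String).toList = ['f'] from rfl,
      show ("kn" : String).toList = ['k', 'n'] from rfl,
      show ("n" : String).toList = ['n'] from rfl,
      show ("wr" : String).toList = ['w', 'r'] from rfl,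
      show ("r" : String).toList = ['r'] from rfl]
    rw [replace_eq_rp, replace_eq_rp, replace_eq_rp]
  rw [hA, hB, fAll_eq_rp]
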